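-- pv_equiv track=rewrite | github.com/miliar/Code_Jam_Webscraper | solutions_python/solutions_year16_round0_nr3/3096.py | base_rep
-- ===== SOURCE A (Python) =====
-- def base_rep(s, base):
--     n = len(s)
--     num = 0
--     sig = 1
--     for i in range(n):
--         if s[n-i-1] == '1':
--            num = num + sig
--         sig = sig*base
--     return num
-- ===== SOURCE B (Python) =====
-- def base_rep(s, base):
--     num = 0
--     for c in s:
--         num = num * base + (1 if c == '1' else 0)
--     return num
-- ===== Notes on version B (the rewrite author's own statement) =====
-- stated objective: faster
-- what changed: Replaces the reversed-index loop that maintains a separate running power sig=base**i with a single left-to-right Horner accumulator num = num*base + bit, eliminating the index arithmetic and the extra big-int power multiplication per step.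
import Mathlib
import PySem

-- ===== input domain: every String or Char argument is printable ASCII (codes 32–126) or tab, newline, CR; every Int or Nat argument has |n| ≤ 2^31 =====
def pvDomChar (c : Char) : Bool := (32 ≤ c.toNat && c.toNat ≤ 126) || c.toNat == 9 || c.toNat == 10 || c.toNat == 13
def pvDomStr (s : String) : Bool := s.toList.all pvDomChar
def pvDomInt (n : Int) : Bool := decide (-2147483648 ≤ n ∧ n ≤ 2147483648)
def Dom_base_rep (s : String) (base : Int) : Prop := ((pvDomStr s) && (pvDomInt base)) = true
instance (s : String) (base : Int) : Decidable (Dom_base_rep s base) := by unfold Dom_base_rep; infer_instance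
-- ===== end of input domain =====

-- B replaces A's reversed-index loop with its running power by a left-to-right Horner accumulator (simpler).

-- ===== PORT A =====
def base_rep (s : String) (base : Int) : Int :=
  let n : Int := PySem.Str.len s
  ((PySem.List.pyRange 0 n 1).foldl
    (fun (p : Int × Int) i =>
      (if PySem.Str.pyGet? s (n - i - 1) = some '1' then p.1 + p.2 else p.1, p.2 * base))
    ((0 : Int), (1 : Int))).1

-- ===== PORT B =====
def base_rep_alt (s : String) (base : Int) : Int :=
  s.toList.foldl (fun num c => num * base + (if c = '1' then 1 else 0)) 0

-- ===== PRECONDITION & SPEC =====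
def Spec_base_rep (s : String) (base : Int) (out : Int) : Prop := out = base_rep_alt s base
instance (s : String) (base : Int) (out : Int) : Decidable (Spec_base_rep s base out) := by unfold Spec_base_rep; infer_instance

-- ===== CLAIM (what is proved, stated in full; the proofs are below) =====
def Claim_equal_base_rep : Prop := ∀ (s : String) (base : Int), Dom_base_rep s base → Spec_base_rep s base (base_rep s base)

-- ===== LEMMAS AND PROOFS =====

-- Horner fold with an arbitrary start value.
theorem horner_gen (base : Int) (l : List Char) :
    ∀ a : Int, l.foldl (fun num c => num * base + (if c = '1' then 1 else 0)) a
      = a * base ^ l.length + l.foldl (fun num c => num * base + (if c = '1' then 1 else 0)) 0 := by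
  induction l with
  | nil => intro a; simp
  | cons c t ih =>
    intro a
    simp only [List.foldl_cons, List.length_cons]
    rw [ih (a * base + _), ih (0 * base + _)]
    ring

-- A's right-to-left accumulate-with-power fold, as a pair, equals Horner.
theorem revfold_eq (base : Int) (l : List Char) :
    ∀ num sig : Int,
      l.reverse.foldl (fun (p : Int × Int) c =>
          (if c = '1' then p.1 + p.2 else p.1, p.2 * base)) (num, sig)
      = (num + sig * l.foldl (fun num c => num * base + (if c = '1' then 1 else 0)) 0,
         sig * base ^ l.length) := by
  induction l with
  | nil => intro num sig; simp
  | cons c t ih =>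
    intro num sig
    rw [List.reverse_cons, List.foldl_append, List.foldl_cons, List.foldl_nil, ih,
      List.foldl_cons, horner_gen base t (0 * base + if c = '1' then 1 else 0)]
    by_cases h : c = '1' <;>
      simp only [h, if_pos, ite_false, List.length_cons, pow_succ] <;>
      refine Prod.ext ?_ ?_ <;> simp only [] <;> ring

theorem base_rep_eq_alt (s : String) (base : Int) : base_rep s base = base_rep_alt s base := by
  unfold base_rep base_rep_alt
  simp only [PySem.Str.len_eq]
  rw [PySem.List.foldl_congr_mem (g := fun (p : Int × Int) i =>
      (if PySem.List.pyGetD s.toList.reverse i ' ' = '1' then p.1 + p.2 else p.1, p.2 * base))]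
  · rw [show ((s.toList.length : Int)) = ((s.toList.reverse.length : Int)) by simp,
      PySem.List.foldl_pyRange_zero_pyGetD' (f := fun (p : Int × Int) c =>
        (if c = '1' then p.1 + p.2 else p.1, p.2 * base))]
    rw [revfold_eq]
    simp
  · intro acc x hx
    rw [PySem.List.mem_pyRange_one] at hx
    obtain ⟨hx0, hxn⟩ := hx
    have hlen2 : x.toNat < s.toList.length := by omega
    have hlen : x.toNat < s.toList.reverse.length := by rw [List.length_reverse]; omega
    have hget : PySem.Str.pyGet? s ((s.toList.length : Int) - x - 1) = s.toList.reverse[x.toNat]? := by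
      rw [show ((s.toList.length : Int) - x - 1) = ((s.toList.length - 1 - x.toNat : Nat) : Int) by
            omega,
        PySem.Str.pyGet?_natCast, List.getElem?_reverse hlen2]
    have hgetD : PySem.List.pyGetD s.toList.reverse x ' ' = s.toList.reverse[x.toNat]'hlen :=
      PySem.List.pyGetD_eq_getElem _ _ hx0 (by rw [List.length_reverse]; omega)
    simp only [hget, List.getElem?_eq_getElem hlen, Option.some.injEq, hgetD]

-- ===== VERDICT (by name: the statement is the Claim_ definition above) =====
theorem base_rep_spec : Claim_equal_base_rep := by
  intro s base _
  unfold Spec_base_rep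
  exact base_rep_eq_alt s base
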